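-- pv_equiv track=rewrite | github.com/fabioguieiro/flow-app | backend/flow-env/app.py | validate_flux
-- ===== SOURCE A (Python) =====
-- def validate_flux(flux):
--     nodes = flux.get("nodes", [])
--     edges = flux.get("edges", [])
--
--     start_nodes = [node for node in nodes if node.get("type") == 'startNode']
--     diamond_nodes = [node for node in nodes if node.get("type") == 'diamondNode']
--     success_nodes = [node for node in nodes if node.get("type") == 'successNode']
--     unsuccess_nodes = [node for node in nodes if node.get("type") == 'unsuccessNode']
--
--     if len(start_nodes) != 1:
--         return False
--
--     for diamond_node in diamond_nodes:
--         incoming_edges = [edge for edge in edges if edge.get("target") == diamond_node.get("id")]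
--         outgoing_edges = [edge for edge in edges if edge.get("source") == diamond_node.get("id")]
--
--         if len(incoming_edges) != 1 or len(outgoing_edges) != 2:
--             return False
--
--     for success_node in success_nodes:
--         incoming_edges = [edge for edge in edges if edge.get("target") == success_node.get("id")]
--         outgoing_edges = [edge for edge in edges if edge.get("source") == success_node.get("id")]
--
--         if len(incoming_edges) != 1 or len(outgoing_edges) != 0:
--             return False
--
--     for unsuccess_node in unsuccess_nodes:
--         incoming_edges = [edge for edge in edges if edge.get("target") == unsuccess_node.get("id")]
--         outgoing_edges = [edge for edge in edges if edge.get("source") == unsuccess_node.get("id")]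
--
--         if len(incoming_edges) != 1 or len(outgoing_edges) != 0:
--             return False
--
--     return True
-- ===== SOURCE B (Python) =====
-- def validate_flux(flux):
--     nodes = flux.get("nodes", [])
--     edges = flux.get("edges", [])
--
--     in_count = {}
--     out_count = {}
--     for edge in edges:
--         t = edge.get("target")
--         s = edge.get("source")
--         in_count[t] = in_count.get(t, 0) + 1
--         out_count[s] = out_count.get(s, 0) + 1
--
--     required = {'diamondNode': (1, 2), 'successNode': (1, 0), 'unsuccessNode': (1, 0)}
--     starts = 0
--     for node in nodes:
--         t = node.get("type")
--         if t == 'startNode':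
--             starts += 1
--         elif t in required:
--             nid = node.get("id")
--             if (in_count.get(nid, 0), out_count.get(nid, 0)) != required[t]:
--                 return False
--     return starts == 1
-- ===== Notes on version B (the rewrite author's own statement) =====
-- stated objective: alternative
-- what changed: Replaces the per-node rescans of the edge list (one filter pass over all edges for every constrained node) by two degree counters built in a single pass over the edges plus a requirement table, then a single pass over the nodes.
import Mathlib
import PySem

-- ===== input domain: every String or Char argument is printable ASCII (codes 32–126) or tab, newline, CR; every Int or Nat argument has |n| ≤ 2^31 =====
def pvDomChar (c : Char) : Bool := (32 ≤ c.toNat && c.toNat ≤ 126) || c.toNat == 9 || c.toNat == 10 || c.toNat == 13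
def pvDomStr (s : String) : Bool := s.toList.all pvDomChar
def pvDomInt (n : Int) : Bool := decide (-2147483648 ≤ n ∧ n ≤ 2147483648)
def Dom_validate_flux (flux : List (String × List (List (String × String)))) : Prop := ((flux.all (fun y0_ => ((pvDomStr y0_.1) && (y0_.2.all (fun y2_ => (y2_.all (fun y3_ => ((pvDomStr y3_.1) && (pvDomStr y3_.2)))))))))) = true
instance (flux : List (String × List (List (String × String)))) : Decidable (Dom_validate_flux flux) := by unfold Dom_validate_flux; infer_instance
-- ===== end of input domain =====

-- B rebuilds the check with two degree counters (one pass over edges) and a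
-- requirement table consulted in one pass over the nodes, instead of A's
-- per-node rescans of the whole edge list.

-- ===== PORT A =====
def validate_flux (flux : List (String × List (List (String × String)))) : Bool :=
  let nodes := (PySem.Dict.mk flux).getD "nodes" []
  let edges := (PySem.Dict.mk flux).getD "edges" []
  let start_nodes := nodes.filter (fun node => (PySem.Dict.mk node).get? "type" == some "startNode")
  let diamond_nodes := nodes.filter (fun node => (PySem.Dict.mk node).get? "type" == some "diamondNode")
  let success_nodes := nodes.filter (fun node => (PySem.Dict.mk node).get? "type" == some "successNode")
  let unsuccess_nodes := nodes.filter (fun node => (PySem.Dict.mk node).get? "type" == some "unsuccessNode")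
  if start_nodes.length ≠ 1 then false
  else
    (diamond_nodes.all (fun d =>
        let incoming := edges.filter (fun e => (PySem.Dict.mk e).get? "target" == (PySem.Dict.mk d).get? "id")
        let outgoing := edges.filter (fun e => (PySem.Dict.mk e).get? "source" == (PySem.Dict.mk d).get? "id")
        incoming.length == 1 && outgoing.length == 2)
     && success_nodes.all (fun s =>
        let incoming := edges.filter (fun e => (PySem.Dict.mk e).get? "target" == (PySem.Dict.mk s).get? "id")
        let outgoing := edges.filter (fun e => (PySem.Dict.mk e).get? "source" == (PySem.Dict.mk s).get? "id")
        incoming.length == 1 && outgoing.length == 0)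
     && unsuccess_nodes.all (fun u =>
        let incoming := edges.filter (fun e => (PySem.Dict.mk e).get? "target" == (PySem.Dict.mk u).get? "id")
        let outgoing := edges.filter (fun e => (PySem.Dict.mk e).get? "source" == (PySem.Dict.mk u).get? "id")
        incoming.length == 1 && outgoing.length == 0))

-- ===== PORT B =====
-- the node loop of Source B (early return False ⇒ result false; at the end starts == 1)
def vfAltLoop (inC outC : PySem.Dict (Option String) Nat)
    (required : PySem.Dict String (Nat × Nat)) :
    List (List (String × String)) → Nat → Bool
  | [], starts => starts == 1
  | node :: rest, starts =>
    let t := (PySem.Dict.mk node).get? "type"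
    if t == some "startNode" then
      vfAltLoop inC outC required rest (starts + 1)
    else
      match t with
      | some ts =>
        match required.get? ts with
        | some req =>
          let nid := (PySem.Dict.mk node).get? "id"
          if (inC.getD nid 0, outC.getD nid 0) == req then
            vfAltLoop inC outC required rest starts
          else false
        | none => vfAltLoop inC outC required rest starts
      | none => vfAltLoop inC outC required rest starts

def validate_flux_alt (flux : List (String × List (List (String × String)))) : Bool :=
  let nodes := (PySem.Dict.mk flux).getD "nodes" []
  let edges := (PySem.Dict.mk flux).getD "edges" []
  let counts := edges.foldl
    (fun (p : PySem.Dict (Option String) Nat × PySem.Dict (Option String) Nat) edge =>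
      let t := (PySem.Dict.mk edge).get? "target"
      let s := (PySem.Dict.mk edge).get? "source"
      (p.1.insert t (p.1.getD t 0 + 1), p.2.insert s (p.2.getD s 0 + 1)))
    (PySem.Dict.empty, PySem.Dict.empty)
  let required : PySem.Dict String (Nat × Nat) :=
    PySem.Dict.mk [("diamondNode", (1, 2)), ("successNode", (1, 0)), ("unsuccessNode", (1, 0))]
  vfAltLoop counts.1 counts.2 required nodes 0

-- ===== PRECONDITION & SPEC =====
def Spec_validate_flux (flux : List (String × List (List (String × String)))) (out : Bool) : Prop := out = validate_flux_alt flux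
instance (flux : List (String × List (List (String × String)))) (out : Bool) : Decidable (Spec_validate_flux flux out) := by unfold Spec_validate_flux; infer_instance

-- ===== CLAIM (what is proved, stated in full; the proofs are below) =====
def Claim_equal_validate_flux : Prop := ∀ (flux : List (String × List (List (String × String)))), Dom_validate_flux flux → Spec_validate_flux flux (validate_flux flux)

-- ===== LEMMAS AND PROOFS =====

-- degree of key k as A counts it
def vfInDeg (edges : List (List (String × String))) (k : Option String) : Nat :=
  (edges.filter (fun e => (PySem.Dict.mk e).get? "target" == k)).length
def vfOutDeg (edges : List (List (String × String))) (k : Option String) : Nat :=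
  (edges.filter (fun e => (PySem.Dict.mk e).get? "source" == k)).length

-- semantic per-node check shared by both sides
def vfOk (edges : List (List (String × String))) (node : List (String × String)) : Bool :=
  let t := (PySem.Dict.mk node).get? "type"
  let nid := (PySem.Dict.mk node).get? "id"
  if t == some "diamondNode" then vfInDeg edges nid == 1 && vfOutDeg edges nid == 2
  else if t == some "successNode" then vfInDeg edges nid == 1 && vfOutDeg edges nid == 0
  else if t == some "unsuccessNode" then vfInDeg edges nid == 1 && vfOutDeg edges nid == 0
  else true

def vfIsStart (node : List (String × String)) : Bool :=
  (PySem.Dict.mk node).get? "type" == some "startNode"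

-- the pair-fold of B builds exactly the two degree counters
theorem vfCounts_spec (edges : List (List (String × String)))
    (d1 d2 : PySem.Dict (Option String) Nat) (k : Option String) :
    ((edges.foldl
      (fun (p : PySem.Dict (Option String) Nat × PySem.Dict (Option String) Nat) edge =>
        let t := (PySem.Dict.mk edge).get? "target"
        let s := (PySem.Dict.mk edge).get? "source"
        (p.1.insert t (p.1.getD t 0 + 1), p.2.insert s (p.2.getD s 0 + 1)))
      (d1, d2)).1).getD k 0 = d1.getD k 0 + vfInDeg edges k ∧
    ((edges.foldl
      (fun (p : PySem.Dict (Option String) Nat × PySem.Dict (Option String) Nat) edge =>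
        let t := (PySem.Dict.mk edge).get? "target"
        let s := (PySem.Dict.mk edge).get? "source"
        (p.1.insert t (p.1.getD t 0 + 1), p.2.insert s (p.2.getD s 0 + 1)))
      (d1, d2)).2).getD k 0 = d2.getD k 0 + vfOutDeg edges k := by
  induction edges generalizing d1 d2 with
  | nil => simp [vfInDeg, vfOutDeg]
  | cons e rest ih =>
    simp only [List.foldl_cons]
    obtain ⟨h1, h2⟩ := ih (d1.insert ((PySem.Dict.mk e).get? "target") (d1.getD ((PySem.Dict.mk e).get? "target") 0 + 1))
      (d2.insert ((PySem.Dict.mk e).get? "source") (d2.getD ((PySem.Dict.mk e).get? "source") 0 + 1))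
    constructor
    · rw [h1, PySem.Dict.getD_insert]
      simp only [vfInDeg, List.filter_cons]
      by_cases hk : (PySem.Dict.mk e).get? "target" = k
      · simp [hk]; omega
      · have : ((PySem.Dict.mk e).get? "target" == k) = false := by
          simpa using hk
        simp [this, vfInDeg]
        intro h; exact absurd h.symm hk
    · rw [h2, PySem.Dict.getD_insert]
      simp only [vfOutDeg, List.filter_cons]
      by_cases hk : (PySem.Dict.mk e).get? "source" = k
      · simp [hk]; omega
      · have : ((PySem.Dict.mk e).get? "source" == k) = false := by
          simpa using hk
        simp [this, vfOutDeg]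
        intro h; exact absurd h.symm hk

-- B's node loop, characterised
theorem vfAltLoop_spec (edges : List (List (String × String)))
    (inC outC : PySem.Dict (Option String) Nat)
    (hin : ∀ k, inC.getD k 0 = vfInDeg edges k)
    (hout : ∀ k, outC.getD k 0 = vfOutDeg edges k)
    (nodes : List (List (String × String))) (starts : Nat) :
    vfAltLoop inC outC
      (PySem.Dict.mk [("diamondNode", (1, 2)), ("successNode", (1, 0)), ("unsuccessNode", (1, 0))])
      nodes starts
    = (decide (starts + nodes.countP vfIsStart = 1) && nodes.all (vfOk edges)) := by
  induction nodes generalizing starts with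
  | nil =>
    simp only [vfAltLoop, List.countP_nil, List.all_nil, Bool.and_true, Nat.add_zero]
    rw [Bool.eq_iff_iff]; simp
  | cons n rest ih =>
    rw [vfAltLoop]
    simp only [List.countP_cons, List.all_cons]
    by_cases hs : ((PySem.Dict.mk n).get? "type" == some "startNode") = true
    · have ht : (PySem.Dict.mk n).get? "type" = some "startNode" := by simpa using hs
      have harith : starts + 1 + List.countP vfIsStart rest =
          starts + (List.countP vfIsStart rest + 1) := by omega
      rw [if_pos hs, ih]
      simp [vfIsStart, ht, vfOk, harith]
    · rw [if_neg hs]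
      have hst : vfIsStart n = false := by simpa [vfIsStart] using hs
      rcases h : (PySem.Dict.mk n).get? "type" with _ | ts
      · rw [ih]; simp [vfOk, h, hst]
      · by_cases hd : ts = "diamondNode"
        · subst hd
          simp only [PySem.Dict.get?_mk_cons]
          norm_num
          rw [ih]
          simp [vfOk, h, ← hin, ← hout, hst, Bool.and_assoc, Bool.and_comm, Bool.and_left_comm]
          rw [Bool.eq_iff_iff]; simp
        · by_cases hsu : ts = "successNode"
          · subst hsu
            simp only [PySem.Dict.get?_mk_cons]
            norm_num
            rw [ih]
            simp [vfOk, h, ← hin, ← hout, hst, hd, Bool.and_assoc, Bool.and_comm, Bool.and_left_comm]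
            rw [Bool.eq_iff_iff]; simp
          · by_cases hu : ts = "unsuccessNode"
            · subst hu
              simp only [PySem.Dict.get?_mk_cons]
              norm_num
              rw [ih]
              simp [vfOk, h, ← hin, ← hout, hst, hd, hsu, Bool.and_assoc, Bool.and_comm, Bool.and_left_comm]
              rw [Bool.eq_iff_iff]; simp
            · simp only [PySem.Dict.get?_mk_cons]
              have e1 : ("diamondNode" == ts) = false := by simpa using (Ne.symm hd)
              have e2 : ("successNode" == ts) = false := by simpa using (Ne.symm hsu)
              have e3 : ("unsuccessNode" == ts) = false := by simpa using (Ne.symm hu)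
              simp only [e1, e2, e3, if_false, PySem.Dict.get?]
              rw [ih]
              have hok : vfOk edges n = true := by
                simp only [vfOk]
                simp [h, hd, hsu, hu]
              simp [hok, hst]

-- A's three filtered-all passes collapse into one pass with vfOk
theorem vfAllAnd {α : Type} (l : List α) (p q : α → Bool) :
    (l.all fun x => p x && q x) = (l.all p && l.all q) := by
  induction l with
  | nil => simp
  | cons a t ih =>
    simp only [List.all_cons, ih]
    cases p a <;> cases q a <;> cases t.all p <;> cases t.all q <;> rfl

theorem vfAllCongr {α : Type} (l : List α) (p q : α → Bool) (h : ∀ x ∈ l, p x = q x) :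
    l.all p = l.all q := by
  induction l with
  | nil => rfl
  | cons a t ih => simp only [List.all_cons, h a (by simp), ih fun x hx => h x (by simp [hx])]

theorem vfOk_pointwise (edges : List (List (String × String))) (n : List (String × String)) :
    ((!((PySem.Dict.mk n).get? "type" == some "diamondNode") ||
        ((edges.filter (fun e => (PySem.Dict.mk e).get? "target" == (PySem.Dict.mk n).get? "id")).length == 1 &&
         (edges.filter (fun e => (PySem.Dict.mk e).get? "source" == (PySem.Dict.mk n).get? "id")).length == 2))
     && (!((PySem.Dict.mk n).get? "type" == some "successNode") ||
        ((edges.filter (fun e => (PySem.Dict.mk e).get? "target" == (PySem.Dict.mk n).get? "id")).length == 1 &&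
         (edges.filter (fun e => (PySem.Dict.mk e).get? "source" == (PySem.Dict.mk n).get? "id")).length == 0))
     && (!((PySem.Dict.mk n).get? "type" == some "unsuccessNode") ||
        ((edges.filter (fun e => (PySem.Dict.mk e).get? "target" == (PySem.Dict.mk n).get? "id")).length == 1 &&
         (edges.filter (fun e => (PySem.Dict.mk e).get? "source" == (PySem.Dict.mk n).get? "id")).length == 0)))
    = vfOk edges n := by
  rcases h : (PySem.Dict.mk n).get? "type" with _ | ts
  · simp [vfOk, h]
  · by_cases hd : ts = "diamondNode"
    · subst hd; simp [vfOk, h, vfInDeg, vfOutDeg]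
    · by_cases hsu : ts = "successNode"
      · subst hsu; simp [vfOk, h, hd, vfInDeg, vfOutDeg]
      · by_cases hu : ts = "unsuccessNode"
        · subst hu; simp [vfOk, h, hd, hsu, vfInDeg, vfOutDeg]
        · simp [vfOk, h, hd, hsu, hu]

theorem vfA_tail (edges nodes : List (List (String × String))) :
    ((nodes.filter (fun node => (PySem.Dict.mk node).get? "type" == some "diamondNode")).all (fun d =>
        (edges.filter (fun e => (PySem.Dict.mk e).get? "target" == (PySem.Dict.mk d).get? "id")).length == 1 &&
        (edges.filter (fun e => (PySem.Dict.mk e).get? "source" == (PySem.Dict.mk d).get? "id")).length == 2)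
     && (nodes.filter (fun node => (PySem.Dict.mk node).get? "type" == some "successNode")).all (fun s =>
        (edges.filter (fun e => (PySem.Dict.mk e).get? "target" == (PySem.Dict.mk s).get? "id")).length == 1 &&
        (edges.filter (fun e => (PySem.Dict.mk e).get? "source" == (PySem.Dict.mk s).get? "id")).length == 0)
     && (nodes.filter (fun node => (PySem.Dict.mk node).get? "type" == some "unsuccessNode")).all (fun u =>
        (edges.filter (fun e => (PySem.Dict.mk e).get? "target" == (PySem.Dict.mk u).get? "id")).length == 1 &&
        (edges.filter (fun e => (PySem.Dict.mk e).get? "source" == (PySem.Dict.mk u).get? "id")).length == 0))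
    = nodes.all (vfOk edges) := by
  simp only [List.all_filter, ← vfAllAnd]
  exact vfAllCongr _ _ _ (fun n _ => vfOk_pointwise edges n)

-- ===== VERDICT (by name: the statement is the Claim_ definition above) =====
theorem validate_flux_spec : Claim_equal_validate_flux := by
  intro flux _
  unfold Spec_validate_flux validate_flux validate_flux_alt
  simp only []
  set nodes := (PySem.Dict.mk flux).getD "nodes" [] with hn
  set edges := (PySem.Dict.mk flux).getD "edges" [] with he
  rw [vfAltLoop_spec edges _ _
    (fun k => by simpa using (vfCounts_spec edges PySem.Dict.empty PySem.Dict.empty k).1)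
    (fun k => by simpa using (vfCounts_spec edges PySem.Dict.empty PySem.Dict.empty k).2)]
  rw [← vfA_tail edges nodes]
  have hlen : (nodes.filter (fun node => (PySem.Dict.mk node).get? "type" == some "startNode")).length
      = nodes.countP vfIsStart := by
    rw [List.countP_eq_length_filter]; rfl
  by_cases h1 : (nodes.filter (fun node => (PySem.Dict.mk node).get? "type" == some "startNode")).length = 1
  · simp [h1, hlen.symm.trans h1]
  · have hd : decide (0 + nodes.countP vfIsStart = 1) = false := by
      rw [decide_eq_false_iff_not, ← hlen]; omega
    rw [if_pos h1, hd, Bool.false_and]
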